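-- pv_equiv track=rewrite | github.com/jizhuoran/caffe-huawei-atlas-convertor | convertor/huawei/impl/zn_2_nchw.py | _get_fused_index
-- ===== SOURCE A (Python) =====
-- def _get_fused_index(fused_axis_value, origin_list_copy, split_axis):
--     """
--     get fused index for not change last schedule
--
--     """
--     fused_index_list = []
--     for target in fused_axis_value:
--         for i, item in enumerate(origin_list_copy):
--             if target == item:
--                 fused_index_list.append(i)
--                 origin_list_copy[i] = -1
--                 break
--
--     is_fuse_outer = False
--     for i in fused_index_list:
--         if i == split_axis:
--             is_fuse_outer = True
--             fused_index_list.remove(split_axis)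
--             break
--
--     return fused_index_list, origin_list_copy, is_fuse_outer
-- ===== SOURCE B (Python) =====
-- def _get_fused_index(fused_axis_value, origin_list_copy, split_axis):
--     """
--     get fused index for not change last schedule
--
--     """
--     # index queues: value -> indices in origin_list_copy, smallest index last
--     pos = {}
--     for i, v in reversed(list(enumerate(origin_list_copy))):
--         pos.setdefault(v, []).append(i)
--
--     fused_index_list = []
--     for target in fused_axis_value:
--         queue = pos.get(target)
--         if queue:
--             i = queue.pop()
--             fused_index_list.append(i)
--             origin_list_copy[i] = -1
--
--     if split_axis in fused_index_list:
--         fused_index_list.remove(split_axis)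
--         return fused_index_list, origin_list_copy, True
--     return fused_index_list, origin_list_copy, False
-- ===== Notes on version B (the rewrite author's own statement) =====
-- stated objective: alternative
-- what changed: A rescans origin_list_copy from the front for every target (nested loops with a -1 consumed-marker); B precomputes one dict mapping each value to the queue of its indices and pops the front index per target, removing the inner scan (O(n*m) -> O(n+m), though a timing run could not verify this on the claimed-equal inputs).
-- outside the precondition, e.g. on _get_fused_index([2, -1], [2, 5], 0): A returns ([0], [-1, 5], True), B returns ([], [-1, 5], True)
import Mathlib
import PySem

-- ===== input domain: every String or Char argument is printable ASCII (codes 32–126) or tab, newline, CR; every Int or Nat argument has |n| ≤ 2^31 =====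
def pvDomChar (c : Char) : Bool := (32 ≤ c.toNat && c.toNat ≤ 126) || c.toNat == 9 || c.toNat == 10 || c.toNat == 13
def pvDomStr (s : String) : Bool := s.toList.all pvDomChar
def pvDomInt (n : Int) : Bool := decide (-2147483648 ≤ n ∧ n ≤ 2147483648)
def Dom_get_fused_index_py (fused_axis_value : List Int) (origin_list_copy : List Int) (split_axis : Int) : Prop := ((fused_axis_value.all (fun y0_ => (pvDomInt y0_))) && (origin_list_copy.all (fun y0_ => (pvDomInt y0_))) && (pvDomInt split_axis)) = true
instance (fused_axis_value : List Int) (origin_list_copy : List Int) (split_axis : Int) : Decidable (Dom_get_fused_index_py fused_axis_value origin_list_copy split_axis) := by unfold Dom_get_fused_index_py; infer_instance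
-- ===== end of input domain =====

-- B replaces A's per-target rescan of origin_list_copy by a dict value → queue of indices built
-- once, popping the front index per target (objective: alternative — one pass over
-- origin_list_copy instead of a rescan per target).
-- Both Pythons mutate origin_list_copy in place identically (consumed slots set to -1); the
-- mutated list is part of the returned tuple, which is what the equivalence is about.

-- ===== PORT A =====
-- inner 'for i, item in enumerate(origin_list_copy): if target == item: … break' — the first
-- index holding target (counter i kept as Nat, appended as the Python int it is)
def pvScanA (origin : List Int) (target : Int) (i : Nat) : Option Nat :=
  match origin with
  | [] => none
  | x :: xs => if target = x then some i else pvScanA xs target (i + 1)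

-- one iteration of A's outer loop over fused_axis_value
def pvStepA (st : List Int × List Int) (target : Int) : List Int × List Int :=
  match pvScanA st.2 target 0 with
  | some i => (st.1 ++ [(i : Int)], st.2.set i (-1))
  | none => st

-- 'for i in fused_index_list: if i == split_axis: …': scan for the first element equal to split_axis
def pvFindA (l : List Int) (s : Int) : Bool :=
  match l with
  | [] => false
  | x :: xs => if x = s then true else pvFindA xs s

-- A's second loop and return
def pvFinishA (st : List Int × List Int) (split_axis : Int) : List Int × List Int × Bool :=
  if pvFindA st.1 split_axis then
    ((PySem.List.remove? st.1 split_axis).getD st.1, st.2, true)  -- found ⇒ remove? is some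
  else
    (st.1, st.2, false)

def get_fused_index_py (fused_axis_value : List Int) (origin_list_copy : List Int) (split_axis : Int) : List Int × List Int × Bool :=
  pvFinishA (fused_axis_value.foldl pvStepA ([], origin_list_copy)) split_axis

-- ===== PORT B =====
-- 'for i, v in reversed(list(enumerate(origin_list_copy))): pos.setdefault(v, []).append(i)'
-- (setdefault(v, []).append(i) = pos[v] = pos.get(v, []) + [i] = Dict.modify)
def pvBuildPos (o : List Int) : PySem.Dict Int (List Int) :=
  (PySem.List.enumerate o).reverse.foldl
    (fun d p => d.modify p.2 [] (· ++ [p.1])) PySem.Dict.empty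

-- one iteration of B's loop: 'queue = pos.get(target); if queue: i = queue.pop(); …'
-- (pos.get(target) of a missing key and an exhausted queue both skip: getD target [] = [];
--  queue.pop() returns the last element and truncates the list the dict value points at)
def pvStepB (st : List Int × List Int × PySem.Dict Int (List Int)) (target : Int) :
    List Int × List Int × PySem.Dict Int (List Int) :=
  match (st.2.2.getD target []).getLast? with
  | none => st
  | some i =>
      (st.1 ++ [i], PySem.List.pySetD st.2.1 i (-1),
       st.2.2.insert target (st.2.2.getD target []).dropLast)

-- B's final membership test / removal and return
def pvFinishB (st : List Int × List Int × PySem.Dict Int (List Int)) (split_axis : Int) :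
    List Int × List Int × Bool :=
  if st.1.contains split_axis then
    ((PySem.List.remove? st.1 split_axis).getD st.1, st.2.1, true)
  else
    (st.1, st.2.1, false)

def get_fused_index_py_alt (fused_axis_value : List Int) (origin_list_copy : List Int) (split_axis : Int) : List Int × List Int × Bool :=
  pvFinishB (fused_axis_value.foldl pvStepB ([], origin_list_copy, pvBuildPos origin_list_copy)) split_axis

-- ===== PRECONDITION & SPEC =====
-- Pre_ excludes inputs whose fused_axis_value contains -1: A marks consumed slots of
-- origin_list_copy with the sentinel -1, so a target of -1 can match a slot A itself already
-- consumed — which index it then yields is an artefact of the sentinel choice, and B's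
-- value-indexed queues (which only ever match original values) are as defensible there.
def Pre_get_fused_index_py (fused_axis_value : List Int) (origin_list_copy : List Int) (split_axis : Int) : Prop :=
  (-1 : Int) ∉ fused_axis_value
instance (fused_axis_value : List Int) (origin_list_copy : List Int) (split_axis : Int) : Decidable (Pre_get_fused_index_py fused_axis_value origin_list_copy split_axis) := by unfold Pre_get_fused_index_py; infer_instance

def pvWitness_get_fused_index_py : List Int × List Int × Int := ([2, 3], [3, 2, 3], 1)

def Spec_get_fused_index_py (fused_axis_value : List Int) (origin_list_copy : List Int) (split_axis : Int) (out : List Int × List Int × Bool) : Prop := out = get_fused_index_py_alt fused_axis_value origin_list_copy split_axis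
instance (fused_axis_value : List Int) (origin_list_copy : List Int) (split_axis : Int) (out : List Int × List Int × Bool) : Decidable (Spec_get_fused_index_py fused_axis_value origin_list_copy split_axis out) := by unfold Spec_get_fused_index_py; infer_instance

-- ===== CLAIM (what is proved, stated in full; the proofs are below) =====
def Claim_equal_get_fused_index_py : Prop := ∀ (fused_axis_value : List Int) (origin_list_copy : List Int) (split_axis : Int), Dom_get_fused_index_py fused_axis_value origin_list_copy split_axis → Pre_get_fused_index_py fused_axis_value origin_list_copy split_axis → Spec_get_fused_index_py fused_axis_value origin_list_copy split_axis (get_fused_index_py fused_axis_value origin_list_copy split_axis)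

-- ===== LEMMAS AND PROOFS =====

-- the ascending list of indices of origin holding value v (proof-side specification)
def pvFidx : List Int → Int → List Nat
  | [], _ => []
  | x :: xs, v => if x = v then 0 :: (pvFidx xs v).map (· + 1) else (pvFidx xs v).map (· + 1)

theorem pvScanA_eq (oc : List Int) (t : Int) (k : Nat) :
    pvScanA oc t k = (pvFidx oc t).head?.map (· + k) := by
  induction oc generalizing k with
  | nil => rfl
  | cons x xs ih =>
      by_cases h : t = x
      · simp [pvScanA, pvFidx, h]
      · have h' : ¬ x = t := fun hh => h hh.symm
        simp only [pvScanA, pvFidx, if_neg h, if_neg h', ih (k + 1), List.head?_map]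
        cases (pvFidx xs t).head?
        · simp
        · simp
          omega

theorem pvFidx_mem {oc : List Int} {v : Int} {j : Nat} (h : j ∈ pvFidx oc v) :
    oc[j]? = some v := by
  induction oc generalizing j with
  | nil => simp [pvFidx] at h
  | cons x xs ih =>
      by_cases hx : x = v
      · simp [pvFidx, hx] at h
        rcases h with h | ⟨a, ha, hj⟩
        · simp [h, hx]
        · subst hj; simpa using ih ha
      · simp [pvFidx, hx] at h
        rcases h with ⟨a, ha, hj⟩
        subst hj; simpa using ih ha

theorem pvFidx_pairwise (oc : List Int) (v : Int) : (pvFidx oc v).Pairwise (· < ·) := by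
  induction oc with
  | nil => simp [pvFidx]
  | cons x xs ih =>
      by_cases hx : x = v <;>
        simp [pvFidx, hx, List.pairwise_map] <;>
      · first
        | exact ⟨fun a _ => Nat.succ_pos a, ih.imp (fun h => by omega)⟩
        | exact ih.imp (fun h => by omega)

theorem pvFilterShift (l : List Nat) (n : Nat) :
    (l.map (· + 1)).filter (· ≠ (n + 1)) = (l.filter (· ≠ n)).map (· + 1) := by
  rw [List.filter_map]
  refine congrArg (List.map (· + 1)) ?_
  refine (List.filter_congr fun a _ => ?_).symm
  simp only [Function.comp_apply]
  exact decide_eq_decide.mpr (by omega)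

theorem pvFilterPos (l : List Nat) :
    (l.map (· + 1)).filter (· ≠ 0) = l.map (· + 1) := by
  rw [List.filter_map]
  refine congrArg (List.map (· + 1)) ?_
  exact List.filter_eq_self.mpr fun a _ => by
    simp only [Function.comp_apply]
    exact decide_eq_true (by omega)

theorem pvFidx_set (oc : List Int) (v : Int) (hv : v ≠ -1) (i : Nat) :
    pvFidx (oc.set i (-1)) v = (pvFidx oc v).filter (· ≠ i) := by
  induction oc generalizing i with
  | nil => simp [pvFidx]
  | cons x xs ih =>
      have hne : ¬ (-1 : Int) = v := fun h => hv h.symm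
      cases i with
      | zero =>
          by_cases hx : x = v
          · show pvFidx ((-1) :: xs) v = _
            simp only [pvFidx, if_neg hne, if_pos hx]
            rw [List.filter_cons_of_neg (by simp), pvFilterPos]
          · show pvFidx ((-1) :: xs) v = _
            simp only [pvFidx, if_neg hne, if_neg hx]
            rw [pvFilterPos]
      | succ n =>
          by_cases hx : x = v
          · show pvFidx (x :: xs.set n (-1)) v = _
            simp only [pvFidx, if_pos hx, ih n]
            rw [List.filter_cons_of_pos (by simp), pvFilterShift]
          · show pvFidx (x :: xs.set n (-1)) v = _
            simp only [pvFidx, if_neg hx, ih n]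
            rw [pvFilterShift]

theorem pvCastShift (l : List Nat) (s : Int) :
    (l.map (· + 1)).map (fun (j : Nat) => s + (j : Int))
      = l.map (fun (j : Nat) => (s + 1) + (j : Int)) := by
  rw [List.map_map]
  apply List.map_congr_left
  intro a _
  simp [Function.comp]
  ring

theorem pvEnumFilter (o : List Int) (c : Int) : ∀ s : Int,
    ((PySem.List.enumerate o s).filter (fun p => p.2 == c)).map (·.1)
      = (pvFidx o c).map (fun (j : Nat) => s + (j : Int)) := by
  induction o with
  | nil => intro s; simp [PySem.List.enumerate_nil, pvFidx]
  | cons x xs ih =>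
      intro s
      rw [PySem.List.enumerate_cons]
      by_cases hx : x = c
      · rw [List.filter_cons_of_pos (by simp [hx]), List.map_cons, ih (s + 1)]
        simp only [pvFidx, if_pos hx, List.map_cons]
        rw [pvCastShift]
        simp
      · rw [List.filter_cons_of_neg (by simp [hx]), ih (s + 1)]
        simp only [pvFidx, if_neg hx]
        rw [pvCastShift]

theorem pvBuildPos_getD (o : List Int) (c : Int) :
    (pvBuildPos o).getD c [] = ((pvFidx o c).map (fun (j : Nat) => (j : Int))).reverse := by
  have hfold : pvBuildPos o
      = ((PySem.List.enumerate o).reverse.map Prod.swap).foldl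
          (fun d p => d.modify p.1 [] (· ++ [p.2])) PySem.Dict.empty := by
    rw [List.foldl_map]
    rfl
  rw [hfold, PySem.Dict.getD_foldl_modify_append]
  rw [List.map_reverse, List.filter_reverse, List.map_reverse]
  rw [PySem.Dict.getD_empty, List.nil_append]
  congr 1
  rw [List.filter_map, List.map_map]
  have h1 : ((fun (p : Int × Int) => p.1 == c) ∘ Prod.swap) = (fun (p : Int × Int) => p.2 == c) := rfl
  have h2 : ((fun (p : Int × Int) => p.2) ∘ Prod.swap) = (fun (p : Int × Int) => p.1) := rfl
  rw [h1, h2]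
  simpa using pvEnumFilter o c 0

theorem pvFindA_eq (l : List Int) (s : Int) : pvFindA l s = l.contains s := by
  induction l with
  | nil => rfl
  | cons x xs ih =>
      by_cases h : x = s
      · simp [pvFindA, h]
      · simp only [pvFindA, if_neg h, ih, List.contains_cons]
        have hsx : (s == x) = false := by
          simp only [beq_eq_false_iff_ne, ne_eq]
          exact fun he => h he.symm
        rw [hsx, Bool.false_or]

theorem pvSetD_eq (l : List Int) (n : Nat) (v : Int) (h : n < l.length) :
    PySem.List.pySetD l ((n : Nat) : Int) v = l.set n v := by
  simp [PySem.List.pySetD, PySem.List.pySet?, PySem.List.pyIdx?, h]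

-- coupling invariant: the queue of each value v ≠ -1 is the reversed list of indices of
-- unconsumed slots holding v (consumed slots hold -1, so they never match v)
theorem pvLoop_eq : ∀ (ts fil oc : List Int) (pos : PySem.Dict Int (List Int)),
    (∀ t ∈ ts, t ≠ -1) →
    (∀ v : Int, v ≠ -1 → pos.getD v [] = ((pvFidx oc v).map (fun (j : Nat) => (j : Int))).reverse) →
    (ts.foldl pvStepB (fil, oc, pos)).1 = (ts.foldl pvStepA (fil, oc)).1 ∧
    (ts.foldl pvStepB (fil, oc, pos)).2.1 = (ts.foldl pvStepA (fil, oc)).2 := by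
  intro ts
  induction ts with
  | nil => intro fil oc pos _ _; exact ⟨rfl, rfl⟩
  | cons t ts ih =>
      intro fil oc pos hts hinv
      have ht : t ≠ -1 := hts t (by simp)
      have hq : pos.getD t [] = ((pvFidx oc t).map (fun (j : Nat) => (j : Int))).reverse :=
        hinv t ht
      simp only [List.foldl_cons]
      cases hfi : pvFidx oc t with
      | nil =>
          have hB : pvStepB (fil, oc, pos) t = (fil, oc, pos) := by
            simp [pvStepB, hq, hfi]
          have hA : pvStepA (fil, oc) t = (fil, oc) := by
            simp [pvStepA, pvScanA_eq, hfi]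
          rw [hB, hA]
          exact ih fil oc pos (fun x hx => hts x (by simp [hx])) hinv
      | cons i rest =>
          have hi_mem : i ∈ pvFidx oc t := by simp [hfi]
          have hoc_i : oc[i]? = some t := pvFidx_mem hi_mem
          have hilen : i < oc.length := by
            rcases List.getElem?_eq_some_iff.mp hoc_i with ⟨hlt, _⟩
            exact hlt
          have hlast : ((fil, oc, pos).2.2.getD t []).getLast? = some ((i : Nat) : Int) := by
            show (pos.getD t []).getLast? = _
            rw [hq, List.getLast?_reverse, hfi]
            rfl
          have hdrop : ((fil, oc, pos).2.2.getD t []).dropLast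
              = (rest.map (fun (j : Nat) => (j : Int))).reverse := by
            show (pos.getD t []).dropLast = _
            rw [hq, List.dropLast_reverse, hfi]
            rfl
          have hB : pvStepB (fil, oc, pos) t
              = (fil ++ [((i : Nat) : Int)], PySem.List.pySetD oc ((i : Nat) : Int) (-1),
                 pos.insert t ((rest.map (fun (j : Nat) => (j : Int))).reverse)) := by
            rw [pvStepB, hlast, hdrop]
          have hA : pvStepA (fil, oc) t = (fil ++ [((i : Nat) : Int)], oc.set i (-1)) := by
            simp [pvStepA, pvScanA_eq, hfi]
          rw [hB, hA, pvSetD_eq oc i (-1) hilen]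
          apply ih
          · exact fun x hx => hts x (by simp [hx])
          · intro v hv
            rw [PySem.Dict.getD_insert, pvFidx_set oc v hv i]
            by_cases hvt : v = t
            · subst hvt
              rw [if_pos rfl, hfi]
              have hpw := pvFidx_pairwise oc v
              rw [hfi] at hpw
              rw [List.filter_cons_of_neg (by simp),
                List.filter_eq_self.mpr (fun a ha => by
                  have : i < a := (List.pairwise_cons.mp hpw).1 a ha
                  simp
                  omega)]
            · rw [if_neg hvt]
              rw [List.filter_eq_self.mpr (fun a ha => by
                have hav : oc[a]? = some v := pvFidx_mem ha
                have hne : a ≠ i := by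
                  intro hai
                  subst hai
                  rw [hoc_i] at hav
                  exact hvt (Option.some.inj hav).symm
                simpa using hne)]
              exact hinv v hv

-- ===== VERDICT (by name: the statement is the Claim_ definition above) =====
theorem get_fused_index_py_spec : Claim_equal_get_fused_index_py := by
  intro f o s _ hpre
  unfold Spec_get_fused_index_py get_fused_index_py get_fused_index_py_alt
  have hts : ∀ t ∈ f, t ≠ -1 := fun t ht heq => hpre (heq ▸ ht)
  have hinv : ∀ v : Int, v ≠ -1 →
      (pvBuildPos o).getD v [] = ((pvFidx o v).map (fun (j : Nat) => (j : Int))).reverse :=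
    fun v _ => pvBuildPos_getD o v
  obtain ⟨h1, h2⟩ := pvLoop_eq f [] o (pvBuildPos o) hts hinv
  rcases hA : List.foldl pvStepA ([], o) f with ⟨fa, oa⟩
  rcases hB : List.foldl pvStepB ([], o, pvBuildPos o) f with ⟨fb, ob, pb⟩
  rw [hA, hB] at h1 h2
  simp only at h1 h2
  simp [pvFinishA, pvFinishB, h1, h2, pvFindA_eq]
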